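-- pv_equiv track=rewrite | github.com/MathalinAK/suggestion | version0.py | extract_title_keywords_relevance
-- ===== SOURCE A (Python) =====
-- def extract_title_keywords_relevance(analysis_text):
--     lines = analysis_text.split("\n")
--     title = ""
--     keywords = []
--     scores = {}
--     in_keywords = False
--     in_scores = False
--     for line in lines:
--         line = line.strip()
--         if line.lower().startswith("title:"):
--             title = line.split(":", 1)[1].strip()
--         elif line.lower().startswith("keywords:"):
--             in_keywords = True
--             continue
--         elif line.lower().startswith("relevance analysis:") or "rating" in line.lower():
--             in_keywords = False
--             in_scores = True
--             continue
--         if in_keywords and "*" in line: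
--             keywords.extend([kw.strip("* ").strip() for kw in line.split("*") if kw.strip()])
--         if in_scores and (line.startswith("-") or line.startswith("*")):
--             try:
--                 clean_line = line.lstrip("-* ").strip()
--                 if ":" in clean_line:
--                     kw_part, rest = clean_line.split(":", 1)
--                     if "%" in rest:
--                         score = int(rest.split("%")[0].strip().split()[-1])
--                         scores[kw_part.strip()] = score
--             except Exception:
--                 continue
--     filtered_keywords = [kw for kw in keywords if scores.get(kw, 0) >= 50]
--     return title, filtered_keywords
-- ===== SOURCE B (Python) =====
-- def _parse_score(line):
--     """Parse one score line 'kw: ... N% ...' -> (kw, N) or None."""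
--     clean = line.lstrip("-* ").strip()
--     if ":" not in clean:
--         return None
--     kw_part, rest = clean.split(":", 1)
--     if "%" not in rest:
--         return None
--     toks = rest.split("%")[0].strip().split()
--     if not toks:
--         return None
--     try:
--         value = int(toks[-1])
--     except ValueError:
--         return None
--     return kw_part.strip(), value
--
--
-- def extract_title_keywords_relevance(analysis_text):
--     # pass 1: tag each surviving stripped line with the section state it is seen in
--     title = ""
--     records = []
--     in_keywords = False
--     in_scores = False
--     for raw in analysis_text.split("\n"):
--         line = raw.strip()
--         low = line.lower()
--         if low.startswith("title:"):
--             title = line.split(":", 1)[1].strip()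
--         elif low.startswith("keywords:"):
--             in_keywords = True
--             continue
--         elif low.startswith("relevance analysis:") or "rating" in low:
--             in_keywords = False
--             in_scores = True
--             continue
--         records.append((in_keywords, in_scores, line))
--     # pass 2a: keywords from the records tagged in_keywords
--     keywords = [kw.strip("* ").strip()
--                 for (k, _, line) in records
--                 if k and "*" in line
--                 for kw in line.split("*") if kw.strip()]
--     # pass 2b: scores from the records tagged in_scores
--     scores = {}
--     for (_, s, line) in records:
--         if s and (line.startswith("-") or line.startswith("*")):
--             parsed = _parse_score(line)
--             if parsed is not None:
--                 scores[parsed[0]] = parsed[1]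
--     return title, [kw for kw in keywords if scores.get(kw, 0) >= 50]
-- ===== Notes on version B (the rewrite author's own statement) =====
-- stated objective: alternative
-- what changed: A's single stateful loop (section flags, keyword list and score dict all mutated per line) is replaced by a tagging pass that records each line with its section state, followed by two independent passes: a comprehension building the keywords and a fold building the scores via an Option-returning _parse_score helper instead of try/except.
import Mathlib
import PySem

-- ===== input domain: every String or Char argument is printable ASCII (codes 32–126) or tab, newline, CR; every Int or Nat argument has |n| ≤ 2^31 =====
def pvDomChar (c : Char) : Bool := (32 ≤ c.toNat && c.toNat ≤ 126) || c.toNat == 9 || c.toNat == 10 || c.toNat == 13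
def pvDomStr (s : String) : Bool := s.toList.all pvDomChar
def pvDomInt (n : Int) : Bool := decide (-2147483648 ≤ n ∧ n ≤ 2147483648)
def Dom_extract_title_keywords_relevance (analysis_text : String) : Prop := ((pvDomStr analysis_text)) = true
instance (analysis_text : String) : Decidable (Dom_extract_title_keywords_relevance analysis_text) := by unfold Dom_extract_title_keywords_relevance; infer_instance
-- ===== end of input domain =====

-- B replaces A's single stateful loop by a tagging pass plus two independent passes over the
-- tagged records (objective: alternative decomposition, same cost; A's and B's return values agree).

-- hand port of s.lstrip(chars): drop the leading characters occurring in chars (exact)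
def pvLstripChars (chars cs : List Char) : List Char := cs.dropWhile (· ∈ chars)

-- ===== PORT A =====

-- the two trailing `if` statements of A's loop body (shared by the title branch and the default path)
def pvA_tail (line title : List Char) (keywords : List (List Char))
    (scores : PySem.Dict (List Char) Int) (in_k in_s : Bool) :
    List Char × List (List Char) × PySem.Dict (List Char) Int × Bool × Bool :=
  let keywords :=
    if in_k && PySem.Chars.isIn ['*'] line then
      keywords ++ ((PySem.Chars.splitOn line ['*']).filter
          (fun kw => !(PySem.Chars.strip kw).isEmpty)).map
          (fun kw => PySem.Chars.strip (PySem.Chars.stripChars kw "* ".toList))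
    else keywords
  let scores :=
    if in_s && (PySem.Chars.startswith line ['-'] || PySem.Chars.startswith line ['*']) then
      -- try: … except Exception: continue — the raising spots ([-1] and int()) keep scores unchanged
      let clean := PySem.Chars.strip (pvLstripChars "-* ".toList line)
      if PySem.Chars.isIn [':'] clean then
        let parts := PySem.Chars.splitOnMax clean [':'] 1
        let kw_part := parts.getD 0 []
        let rest := parts.getD 1 []
        if PySem.Chars.isIn ['%'] rest then
          let toks := PySem.Chars.split₀ (PySem.Chars.strip ((PySem.Chars.splitOn rest ['%']).getD 0 []))
          match toks.getLast? with                      -- [-1] : IndexError → continue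
          | none => scores
          | some t =>
            match PySem.Int.ofChars? t with             -- int() : ValueError → continue
            | none => scores
            | some v => scores.insert (PySem.Chars.strip kw_part) v
        else scores
      else scores
    else scores
  (title, keywords, scores, in_k, in_s)

-- one iteration of A's `for line in lines` loop
def pvA_step (st : List Char × List (List Char) × PySem.Dict (List Char) Int × Bool × Bool)
    (raw : List Char) :
    List Char × List (List Char) × PySem.Dict (List Char) Int × Bool × Bool :=
  let (title, keywords, scores, in_k, in_s) := st
  let line := PySem.Chars.strip raw
  let low := PySem.Chars.lower line
  if PySem.Chars.startswith low "title:".toList then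
    pvA_tail line (PySem.Chars.strip ((PySem.Chars.splitOnMax line [':'] 1).getD 1 []))
      keywords scores in_k in_s
  else if PySem.Chars.startswith low "keywords:".toList then
    (title, keywords, scores, true, in_s)               -- continue
  else if PySem.Chars.startswith low "relevance analysis:".toList
       || PySem.Chars.isIn "rating".toList low then
    (title, keywords, scores, false, true)              -- continue
  else
    pvA_tail line title keywords scores in_k in_s

def extract_title_keywords_relevance (analysis_text : String) : String × List String :=
  let lines := PySem.Chars.splitOn analysis_text.toList ['\n']
  let st := lines.foldl pvA_step ([], [], PySem.Dict.empty, false, false)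
  let (title, keywords, scores, _, _) := st
  (String.ofList title,
   (keywords.filter (fun kw => decide (50 ≤ scores.getD kw 0))).map String.ofList)

-- ===== PORT B =====

-- _parse_score: one score line 'kw: … N% …' -> some (kw, N), none where A's try/except would skip
def pvB_parseScore? (line : List Char) : Option (List Char × Int) :=
  let clean := PySem.Chars.strip (pvLstripChars "-* ".toList line)
  if PySem.Chars.isIn [':'] clean then
    let parts := PySem.Chars.splitOnMax clean [':'] 1
    let kw_part := parts.getD 0 []
    let rest := parts.getD 1 []
    if PySem.Chars.isIn ['%'] rest then
      let toks := PySem.Chars.split₀ (PySem.Chars.strip ((PySem.Chars.splitOn rest ['%']).getD 0 []))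
      match toks.getLast? with
      | none => none
      | some t =>
        match PySem.Int.ofChars? t with
        | none => none
        | some v => some (PySem.Chars.strip kw_part, v)
    else none
  else none

-- pass 1: tag each surviving stripped line with the section state it is seen in (and track title)
def pvB_pass1 (st : List Char × Bool × Bool × List (Bool × Bool × List Char))
    (raw : List Char) : List Char × Bool × Bool × List (Bool × Bool × List Char) :=
  let (title, in_k, in_s, records) := st
  let line := PySem.Chars.strip raw
  let low := PySem.Chars.lower line
  if PySem.Chars.startswith low "title:".toList then
    (PySem.Chars.strip ((PySem.Chars.splitOnMax line [':'] 1).getD 1 []), in_k, in_s,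
     records ++ [(in_k, in_s, line)])
  else if PySem.Chars.startswith low "keywords:".toList then
    (title, true, in_s, records)
  else if PySem.Chars.startswith low "relevance analysis:".toList
       || PySem.Chars.isIn "rating".toList low then
    (title, false, true, records)
  else
    (title, in_k, in_s, records ++ [(in_k, in_s, line)])

-- pass 2a: keyword comprehension over the records tagged in_keywords
def pvB_kws (records : List (Bool × Bool × List Char)) : List (List Char) :=
  (records.filter (fun r => r.1 && PySem.Chars.isIn ['*'] r.2.2)).flatMap
    (fun r => ((PySem.Chars.splitOn r.2.2 ['*']).filter
        (fun kw => !(PySem.Chars.strip kw).isEmpty)).map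
        (fun kw => PySem.Chars.strip (PySem.Chars.stripChars kw "* ".toList)))

-- pass 2b: one score-dict update per record
def pvB_scoreStep (sc : PySem.Dict (List Char) Int) (r : Bool × Bool × List Char) :
    PySem.Dict (List Char) Int :=
  if r.2.1 && (PySem.Chars.startswith r.2.2 ['-'] || PySem.Chars.startswith r.2.2 ['*']) then
    match pvB_parseScore? r.2.2 with
    | none => sc
    | some (k, v) => sc.insert k v
  else sc

def extract_title_keywords_relevance_alt (analysis_text : String) : String × List String :=
  let st := (PySem.Chars.splitOn analysis_text.toList ['\n']).foldl pvB_pass1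
    ([], false, false, [])
  let (title, _, _, records) := st
  let keywords := pvB_kws records
  let scores := records.foldl pvB_scoreStep PySem.Dict.empty
  (String.ofList title,
   (keywords.filter (fun kw => decide (50 ≤ scores.getD kw 0))).map String.ofList)

-- ===== PRECONDITION & SPEC =====
def Spec_extract_title_keywords_relevance (analysis_text : String) (out : String × List String) : Prop := out = extract_title_keywords_relevance_alt analysis_text
instance (analysis_text : String) (out : String × List String) : Decidable (Spec_extract_title_keywords_relevance analysis_text out) := by unfold Spec_extract_title_keywords_relevance; infer_instance

-- ===== CLAIM (what is proved, stated in full; the proofs are below) =====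
def Claim_equal_extract_title_keywords_relevance : Prop := ∀ (analysis_text : String), Dom_extract_title_keywords_relevance analysis_text → Spec_extract_title_keywords_relevance analysis_text (extract_title_keywords_relevance analysis_text)

-- ===== LEMMAS AND PROOFS =====

-- branch equations for B's pass-1 step
lemma pvB_pass1_title {raw : List Char}
    (h : PySem.Chars.startswith (PySem.Chars.lower (PySem.Chars.strip raw)) "title:".toList = true)
    (t : List Char) (ik is : Bool) (recs : List (Bool × Bool × List Char)) :
    pvB_pass1 (t, ik, is, recs) raw =
      (PySem.Chars.strip ((PySem.Chars.splitOnMax (PySem.Chars.strip raw) [':'] 1).getD 1 []),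
       ik, is, recs ++ [(ik, is, PySem.Chars.strip raw)]) := by
  unfold pvB_pass1; dsimp only; rw [h]; simp

lemma pvB_pass1_kw {raw : List Char}
    (h1 : PySem.Chars.startswith (PySem.Chars.lower (PySem.Chars.strip raw)) "title:".toList = false)
    (h2 : PySem.Chars.startswith (PySem.Chars.lower (PySem.Chars.strip raw)) "keywords:".toList = true)
    (t : List Char) (ik is : Bool) (recs : List (Bool × Bool × List Char)) :
    pvB_pass1 (t, ik, is, recs) raw = (t, true, is, recs) := by
  unfold pvB_pass1; dsimp only; rw [h1, h2]; simp

lemma pvB_pass1_rel {raw : List Char}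
    (h1 : PySem.Chars.startswith (PySem.Chars.lower (PySem.Chars.strip raw)) "title:".toList = false)
    (h2 : PySem.Chars.startswith (PySem.Chars.lower (PySem.Chars.strip raw)) "keywords:".toList = false)
    (h3 : (PySem.Chars.startswith (PySem.Chars.lower (PySem.Chars.strip raw)) "relevance analysis:".toList
        || PySem.Chars.isIn "rating".toList (PySem.Chars.lower (PySem.Chars.strip raw))) = true)
    (t : List Char) (ik is : Bool) (recs : List (Bool × Bool × List Char)) :
    pvB_pass1 (t, ik, is, recs) raw = (t, false, true, recs) := by
  unfold pvB_pass1; dsimp only; rw [h1, h2, h3]; simp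

lemma pvB_pass1_def {raw : List Char}
    (h1 : PySem.Chars.startswith (PySem.Chars.lower (PySem.Chars.strip raw)) "title:".toList = false)
    (h2 : PySem.Chars.startswith (PySem.Chars.lower (PySem.Chars.strip raw)) "keywords:".toList = false)
    (h3 : (PySem.Chars.startswith (PySem.Chars.lower (PySem.Chars.strip raw)) "relevance analysis:".toList
        || PySem.Chars.isIn "rating".toList (PySem.Chars.lower (PySem.Chars.strip raw))) = false)
    (t : List Char) (ik is : Bool) (recs : List (Bool × Bool × List Char)) :
    pvB_pass1 (t, ik, is, recs) raw = (t, ik, is, recs ++ [(ik, is, PySem.Chars.strip raw)]) := by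
  unfold pvB_pass1; dsimp only; rw [h1, h2, h3]; simp

-- branch equations for A's step
lemma pvA_step_title {raw : List Char}
    (h : PySem.Chars.startswith (PySem.Chars.lower (PySem.Chars.strip raw)) "title:".toList = true)
    (t : List Char) (kws : List (List Char)) (sc : PySem.Dict (List Char) Int) (ik is : Bool) :
    pvA_step (t, kws, sc, ik, is) raw =
      pvA_tail (PySem.Chars.strip raw)
        (PySem.Chars.strip ((PySem.Chars.splitOnMax (PySem.Chars.strip raw) [':'] 1).getD 1 []))
        kws sc ik is := by
  unfold pvA_step; dsimp only; rw [h]; simp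

lemma pvA_step_kw {raw : List Char}
    (h1 : PySem.Chars.startswith (PySem.Chars.lower (PySem.Chars.strip raw)) "title:".toList = false)
    (h2 : PySem.Chars.startswith (PySem.Chars.lower (PySem.Chars.strip raw)) "keywords:".toList = true)
    (t : List Char) (kws : List (List Char)) (sc : PySem.Dict (List Char) Int) (ik is : Bool) :
    pvA_step (t, kws, sc, ik, is) raw = (t, kws, sc, true, is) := by
  unfold pvA_step; dsimp only; rw [h1, h2]; simp

lemma pvA_step_rel {raw : List Char}
    (h1 : PySem.Chars.startswith (PySem.Chars.lower (PySem.Chars.strip raw)) "title:".toList = false)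
    (h2 : PySem.Chars.startswith (PySem.Chars.lower (PySem.Chars.strip raw)) "keywords:".toList = false)
    (h3 : (PySem.Chars.startswith (PySem.Chars.lower (PySem.Chars.strip raw)) "relevance analysis:".toList
        || PySem.Chars.isIn "rating".toList (PySem.Chars.lower (PySem.Chars.strip raw))) = true)
    (t : List Char) (kws : List (List Char)) (sc : PySem.Dict (List Char) Int) (ik is : Bool) :
    pvA_step (t, kws, sc, ik, is) raw = (t, kws, sc, false, true) := by
  unfold pvA_step; dsimp only; rw [h1, h2, h3]; simp

lemma pvA_step_def {raw : List Char}
    (h1 : PySem.Chars.startswith (PySem.Chars.lower (PySem.Chars.strip raw)) "title:".toList = false)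
    (h2 : PySem.Chars.startswith (PySem.Chars.lower (PySem.Chars.strip raw)) "keywords:".toList = false)
    (h3 : (PySem.Chars.startswith (PySem.Chars.lower (PySem.Chars.strip raw)) "relevance analysis:".toList
        || PySem.Chars.isIn "rating".toList (PySem.Chars.lower (PySem.Chars.strip raw))) = false)
    (t : List Char) (kws : List (List Char)) (sc : PySem.Dict (List Char) Int) (ik is : Bool) :
    pvA_step (t, kws, sc, ik, is) raw = pvA_tail (PySem.Chars.strip raw) t kws sc ik is := by
  unfold pvA_step; dsimp only; rw [h1, h2, h3]; simp

-- A's inline score update equals B's parse-then-insert update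
lemma pvScore_step_eq (line : List Char) (sc : PySem.Dict (List Char) Int) (ik in_s : Bool) :
    (if in_s && (PySem.Chars.startswith line ['-'] || PySem.Chars.startswith line ['*']) then
      let clean := PySem.Chars.strip (pvLstripChars "-* ".toList line)
      if PySem.Chars.isIn [':'] clean then
        let parts := PySem.Chars.splitOnMax clean [':'] 1
        let kw_part := parts.getD 0 []
        let rest := parts.getD 1 []
        if PySem.Chars.isIn ['%'] rest then
          let toks := PySem.Chars.split₀ (PySem.Chars.strip ((PySem.Chars.splitOn rest ['%']).getD 0 []))
          match toks.getLast? with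
          | none => sc
          | some t =>
            match PySem.Int.ofChars? t with
            | none => sc
            | some v => sc.insert (PySem.Chars.strip kw_part) v
        else sc
      else sc
    else sc) = pvB_scoreStep sc (ik, in_s, line) := by
  unfold pvB_scoreStep pvB_parseScore?
  simp only []
  split_ifs <;> try rfl
  · split <;> rename_i h1
    · simp_all
    · split <;> simp_all

-- A's inline keyword extension equals B's per-record comprehension contribution
lemma pvKw_one (line : List Char) (kws : List (List Char)) (ik is : Bool) :
    (if ik && PySem.Chars.isIn ['*'] line then
      kws ++ ((PySem.Chars.splitOn line ['*']).filter
          (fun kw => !(PySem.Chars.strip kw).isEmpty)).map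
          (fun kw => PySem.Chars.strip (PySem.Chars.stripChars kw "* ".toList))
    else kws) = kws ++ pvB_kws [(ik, is, line)] := by
  unfold pvB_kws
  cases hk : (ik && PySem.Chars.isIn ['*'] line) <;> simp [hk]

-- A's trailing `if`s equal B's per-record keyword and score contributions
lemma pvA_tail_eq (line t : List Char) (kws : List (List Char))
    (sc : PySem.Dict (List Char) Int) (ik is : Bool) :
    pvA_tail line t kws sc ik is =
      (t, kws ++ pvB_kws [(ik, is, line)], pvB_scoreStep sc (ik, is, line), ik, is) := by
  unfold pvA_tail
  dsimp only
  rw [pvKw_one line kws ik is, pvScore_step_eq line sc ik is]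

lemma pvB_kws_cons (r : Bool × Bool × List Char) (l : List (Bool × Bool × List Char)) :
    pvB_kws (r :: l) = pvB_kws [r] ++ pvB_kws l := by
  unfold pvB_kws
  cases h : (r.1 && PySem.Chars.isIn ['*'] r.2.2) <;> simp [h]

-- pass1's records accumulator only accumulates: factoring out the initial records
lemma pvB_pass1_records (lines : List (List Char)) :
    ∀ (t : List Char) (ik is : Bool) (recs : List (Bool × Bool × List Char)),
    lines.foldl pvB_pass1 (t, ik, is, recs) =
      ((lines.foldl pvB_pass1 (t, ik, is, [])).1,
       (lines.foldl pvB_pass1 (t, ik, is, [])).2.1,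
       (lines.foldl pvB_pass1 (t, ik, is, [])).2.2.1,
       recs ++ (lines.foldl pvB_pass1 (t, ik, is, [])).2.2.2) := by
  induction lines with
  | nil => intro t ik is recs; simp
  | cons raw rest ih =>
    intro t ik is recs
    by_cases h1 : PySem.Chars.startswith (PySem.Chars.lower (PySem.Chars.strip raw)) "title:".toList = true
    · simp only [List.foldl_cons, pvB_pass1_title h1, List.nil_append]
      rw [ih _ _ _ (recs ++ [(ik, is, PySem.Chars.strip raw)]), ih _ _ _ [(ik, is, PySem.Chars.strip raw)]]
      simp
    · by_cases h2 : PySem.Chars.startswith (PySem.Chars.lower (PySem.Chars.strip raw)) "keywords:".toList = true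
      · simp only [List.foldl_cons, pvB_pass1_kw (eq_false_of_ne_true h1) h2]
        exact ih _ _ _ recs
      · by_cases h3 : (PySem.Chars.startswith (PySem.Chars.lower (PySem.Chars.strip raw)) "relevance analysis:".toList
            || PySem.Chars.isIn "rating".toList (PySem.Chars.lower (PySem.Chars.strip raw))) = true
        · simp only [List.foldl_cons,
            pvB_pass1_rel (eq_false_of_ne_true h1) (eq_false_of_ne_true h2) h3]
          exact ih _ _ _ recs
        · simp only [List.foldl_cons,
            pvB_pass1_def (eq_false_of_ne_true h1) (eq_false_of_ne_true h2) (eq_false_of_ne_true h3),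
            List.nil_append]
          rw [ih _ _ _ (recs ++ [(ik, is, PySem.Chars.strip raw)]), ih _ _ _ [(ik, is, PySem.Chars.strip raw)]]
          simp

-- the main loop invariant: A's fold equals B's pass1 followed by the two record passes
lemma pvLoop_eq (lines : List (List Char)) :
    ∀ (t : List Char) (kws : List (List Char)) (sc : PySem.Dict (List Char) Int) (ik is : Bool),
    lines.foldl pvA_step (t, kws, sc, ik, is) =
      ((lines.foldl pvB_pass1 (t, ik, is, [])).1,
       kws ++ pvB_kws (lines.foldl pvB_pass1 (t, ik, is, [])).2.2.2,
       ((lines.foldl pvB_pass1 (t, ik, is, [])).2.2.2).foldl pvB_scoreStep sc,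
       (lines.foldl pvB_pass1 (t, ik, is, [])).2.1,
       (lines.foldl pvB_pass1 (t, ik, is, [])).2.2.1) := by
  induction lines with
  | nil => intro t kws sc ik is; simp [pvB_kws]
  | cons raw rest ih =>
    intro t kws sc ik is
    by_cases h1 : PySem.Chars.startswith (PySem.Chars.lower (PySem.Chars.strip raw)) "title:".toList = true
    · simp only [List.foldl_cons, pvA_step_title h1, pvA_tail_eq, pvB_pass1_title h1, List.nil_append]
      rw [ih, pvB_pass1_records rest _ _ _ [(ik, is, PySem.Chars.strip raw)]]
      simp
      rw [← pvB_kws_cons]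
    · by_cases h2 : PySem.Chars.startswith (PySem.Chars.lower (PySem.Chars.strip raw)) "keywords:".toList = true
      · simp only [List.foldl_cons, pvA_step_kw (eq_false_of_ne_true h1) h2,
          pvB_pass1_kw (eq_false_of_ne_true h1) h2]
        exact ih _ _ _ _ _
      · by_cases h3 : (PySem.Chars.startswith (PySem.Chars.lower (PySem.Chars.strip raw)) "relevance analysis:".toList
            || PySem.Chars.isIn "rating".toList (PySem.Chars.lower (PySem.Chars.strip raw))) = true
        · simp only [List.foldl_cons,
            pvA_step_rel (eq_false_of_ne_true h1) (eq_false_of_ne_true h2) h3,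
            pvB_pass1_rel (eq_false_of_ne_true h1) (eq_false_of_ne_true h2) h3]
          exact ih _ _ _ _ _
        · simp only [List.foldl_cons,
            pvA_step_def (eq_false_of_ne_true h1) (eq_false_of_ne_true h2) (eq_false_of_ne_true h3),
            pvA_tail_eq,
            pvB_pass1_def (eq_false_of_ne_true h1) (eq_false_of_ne_true h2) (eq_false_of_ne_true h3),
            List.nil_append]
          rw [ih, pvB_pass1_records rest _ _ _ [(ik, is, PySem.Chars.strip raw)]]
          simp
          rw [← pvB_kws_cons]

-- ===== VERDICT (by name: the statement is the Claim_ definition above) =====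
theorem extract_title_keywords_relevance_spec : Claim_equal_extract_title_keywords_relevance := by
  intro s _
  unfold Spec_extract_title_keywords_relevance extract_title_keywords_relevance extract_title_keywords_relevance_alt
  simp only [pvLoop_eq, List.nil_append]
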